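-- pv_equiv track=rewrite | github.com/timlenertz/info-h-502 | city_generator/util.py | cycle_pairs
-- ===== SOURCE A (Python) =====
-- def cycle_pairs(items):
-- 	"""Generator which yields adjacent pairs of list, followed by one from last item to first."""
-- 	if len(items) <= 1:
-- 		return
-- 	prev = items[0]
-- 	for curr in items[1:]:
-- 		yield (prev, curr)
-- 		prev = curr
-- 	yield (prev, items[0])
-- ===== SOURCE B (Python) =====
-- def cycle_pairs(items):
-- 	"""Generator which yields adjacent cyclic pairs: zip the list with its rotation by one."""
-- 	if len(items) <= 1:
-- 		return
-- 	rotated = items[1:] + items[:1]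
-- 	for pair in zip(items, rotated):
-- 		yield pair
-- ===== Notes on version B (the rewrite author's own statement) =====
-- stated objective: simpler
-- what changed: Replaces the running prev accumulator loop (with a separate final wraparound yield) by zipping the list against its rotation by one, so all pairs including the wraparound come from one uniform zip.
import Mathlib
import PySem

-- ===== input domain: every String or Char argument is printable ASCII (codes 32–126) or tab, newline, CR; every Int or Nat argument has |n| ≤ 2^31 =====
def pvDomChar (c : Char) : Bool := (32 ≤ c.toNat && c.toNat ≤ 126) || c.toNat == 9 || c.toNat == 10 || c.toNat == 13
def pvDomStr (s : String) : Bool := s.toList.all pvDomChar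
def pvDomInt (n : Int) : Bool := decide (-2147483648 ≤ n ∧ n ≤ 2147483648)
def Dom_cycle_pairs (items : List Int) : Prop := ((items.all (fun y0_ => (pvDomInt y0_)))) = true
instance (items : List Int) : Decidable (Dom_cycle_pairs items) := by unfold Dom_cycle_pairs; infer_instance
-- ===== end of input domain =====

-- ===== PORT A =====
-- A's loop: carry 'prev', yield (prev, curr) for each curr of items[1:], then yield (prev, items[0]).
def cyclePairsGo (first : Int) (prev : Int) : List Int → List (Int × Int)
  | [] => [(prev, first)]
  | curr :: rest => (prev, curr) :: cyclePairsGo first curr rest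

def cycle_pairs (items : List Int) : List (Int × Int) :=
  if items.length ≤ 1 then []
  else
    match items with
    | [] => []
    | x :: rest => cyclePairsGo x x rest

-- ===== PORT B =====
-- B: zip the list with its rotation by one (items[1:] + items[:1]).
def cycle_pairs_alt (items : List Int) : List (Int × Int) :=
  if items.length ≤ 1 then []
  else items.zip (PySem.List.slice items (some 1) none ++ PySem.List.slice items none (some 1))

-- ===== PRECONDITION & SPEC =====
def Spec_cycle_pairs (items : List Int) (out : List (Int × Int)) : Prop := out = cycle_pairs_alt items
instance (items : List Int) (out : List (Int × Int)) : Decidable (Spec_cycle_pairs items out) := by unfold Spec_cycle_pairs; infer_instance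

-- ===== CLAIM (what is proved, stated in full; the proofs are below) =====
def Claim_equal_cycle_pairs : Prop := ∀ (items : List Int), Dom_cycle_pairs items → Spec_cycle_pairs items (cycle_pairs items)

-- ===== LEMMAS AND PROOFS =====
theorem cyclePairsGo_eq_zip (first : Int) : ∀ (t : List Int) (prev : Int),
    cyclePairsGo first prev t = (prev :: t).zip (t ++ [first]) := by
  intro t
  induction t with
  | nil => intro prev; simp [cyclePairsGo]
  | cons c t' ih => intro prev; simp [cyclePairsGo, ih c, List.zip]

-- ===== VERDICT (by name: the statement is the Claim_ definition above) =====
theorem cycle_pairs_spec : Claim_equal_cycle_pairs := by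
  intro items _
  unfold Spec_cycle_pairs cycle_pairs cycle_pairs_alt
  match items with
  | [] => rfl
  | [x] => rfl
  | x :: y :: rest =>
    simp only [List.length_cons]
    rw [if_neg (by omega), if_neg (by omega)]
    rw [cyclePairsGo_eq_zip]
    congr 1
    rw [PySem.List.slice_from_one, show (some (1:Int)) = some ((1:Nat):Int) by norm_num,
        PySem.List.slice_to_natCast]
    simp
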